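-- pv_equiv track=rewrite | github.com/wannaberosy/DRL | paper/md_to_docx.py | make_run
-- ===== SOURCE A (Python) =====
-- def escape_text(s: str) -> str:
--     return (s.replace('&', '&amp;')
--              .replace('<', '&lt;')
--              .replace('>', '&gt;'))
--
-- def make_run(text: str) -> str:
--     parts = text.split('\n')
--     runs = []
--     for i, part in enumerate(parts):
--         t = escape_text(part)
--         runs.append(f'<w:r><w:t xml:space="preserve">{t}</w:t></w:r>')
--         if i < len(parts) - 1:
--             runs.append('<w:r><w:br/></w:r>')
--     return ''.join(runs)
-- ===== SOURCE B (Python) =====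
-- _BREAK = '</w:t></w:r><w:r><w:br/></w:r><w:r><w:t xml:space="preserve">'
--
-- def _esc(c: str) -> str:
--     if c == '&':
--         return '&amp;'
--     if c == '<':
--         return '&lt;'
--     if c == '>':
--         return '&gt;'
--     if c == '\n':
--         return _BREAK
--     return c
--
-- def make_run(text: str) -> str:
--     return ('<w:r><w:t xml:space="preserve">'
--             + ''.join(map(_esc, text))
--             + '</w:t></w:r>')
-- ===== Notes on version B (the rewrite author's own statement) =====
-- stated objective: alternative
-- what changed: Replaces split-on-newline + per-part chained whole-string replaces + indexed loop with a break branch by a single character-level pass: each character maps to its XML fragment (newline maps to the close-run/break/open-run separator) and the pieces are joined once between a fixed prefix and suffix.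
import Mathlib
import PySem

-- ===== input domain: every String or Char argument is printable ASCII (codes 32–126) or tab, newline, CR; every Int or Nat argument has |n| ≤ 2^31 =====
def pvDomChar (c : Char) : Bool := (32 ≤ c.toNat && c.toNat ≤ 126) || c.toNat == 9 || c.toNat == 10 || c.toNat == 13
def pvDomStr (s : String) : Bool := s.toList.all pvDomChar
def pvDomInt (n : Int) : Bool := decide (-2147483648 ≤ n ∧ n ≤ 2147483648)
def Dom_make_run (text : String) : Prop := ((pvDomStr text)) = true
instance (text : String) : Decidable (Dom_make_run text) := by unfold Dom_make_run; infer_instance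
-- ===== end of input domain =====

-- B replaces A's split-on-newline / per-part chained replaces / indexed loop with one character-level mapping pass joined once (objective: alternative decomposition, same cost).

-- ===== PORT A =====
def escape_text (s : String) : String :=
  PySem.Str.replace (PySem.Str.replace (PySem.Str.replace s "&" "&amp;") "<" "&lt;") ">" "&gt;"

def make_run (text : String) : String :=
  let parts := (PySem.Str.split? text "\n").getD []
  let runs : List String :=
    (PySem.List.enumerate parts).foldl (fun runs ip =>
      let t := escape_text ip.2
      let runs := runs ++ ["<w:r><w:t xml:space=\"preserve\">" ++ t ++ "</w:t></w:r>"]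
      if ip.1 < (parts.length : Int) - 1 then runs ++ ["<w:r><w:br/></w:r>"] else runs) []
  PySem.Str.join "" runs

-- ===== PORT B =====
def pvEscChar (c : Char) : String :=
  if c = '&' then "&amp;"
  else if c = '<' then "&lt;"
  else if c = '>' then "&gt;"
  else if c = '\n' then "</w:t></w:r><w:r><w:br/></w:r><w:r><w:t xml:space=\"preserve\">"
  else String.ofList [c]

def make_run_alt (text : String) : String :=
  "<w:r><w:t xml:space=\"preserve\">"
    ++ PySem.Str.join "" (text.toList.map pvEscChar)
    ++ "</w:t></w:r>"

-- ===== PRECONDITION & SPEC =====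
def Spec_make_run (text : String) (out : String) : Prop := out = make_run_alt text
instance (text : String) (out : String) : Decidable (Spec_make_run text out) := by unfold Spec_make_run; infer_instance

-- ===== CLAIM (what is proved, stated in full; the proofs are below) =====
def Claim_equal_make_run : Prop := ∀ (text : String), Dom_make_run text → Spec_make_run text (make_run text)

-- ===== LEMMAS AND PROOFS =====

-- character-level escaping that characterises A's chained whole-string replaces
def esc3 (c : Char) : List Char :=
  if c = '&' then "&amp;".toList
  else if c = '<' then "&lt;".toList
  else if c = '>' then "&gt;".toList
  else [c]

-- structural split on '\n'
def splitNL : List Char → List (List Char)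
  | [] => [[]]
  | c :: t =>
    if c = '\n' then [] :: splitNL t
    else
      match splitNL t with
      | [] => [[c]]
      | h :: tl => (c :: h) :: tl

def headPrep (p : List Char) : List (List Char) → List (List Char)
  | [] => [p]
  | h :: tl => (p ++ h) :: tl

def wrapS (p : String) : String :=
  "<w:r><w:t xml:space=\"preserve\">" ++ escape_text p ++ "</w:t></w:r>"

def spread : List String → List String
  | [] => []
  | [p] => [wrapS p]
  | p :: q :: tl => wrapS p :: "<w:r><w:br/></w:r>" :: spread (q :: tl)

def midL : List Char := "</w:t></w:r><w:r><w:br/></w:r><w:r><w:t xml:space=\"preserve\">".toList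

theorem splitNL_ne_nil (l : List Char) : splitNL l ≠ [] := by
  cases l with
  | nil => simp [splitNL]
  | cons c t =>
    simp only [splitNL]
    split
    · simp
    · split <;> simp

theorem replace_go_single (a : Char) (new : List Char) :
    ∀ (l : List Char) (fuel : Nat) (acc : List Char), l.length ≤ fuel →
      PySem.Chars.replace.go [a] new fuel l acc
        = acc.reverse ++ l.flatMap (fun c => if c = a then new else [c]) := by
  intro l
  induction l with
  | nil =>
    intro fuel acc _
    rw [PySem.Chars.replace.go.eq_def]
    cases fuel <;> simp
  | cons c t ih =>
    intro fuel acc h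
    cases fuel with
    | zero => simp at h
    | succ f =>
      rw [PySem.Chars.replace.go.eq_def]
      simp only [List.isPrefixOf, List.flatMap_cons, Bool.and_true, List.length_cons] at *
      by_cases hc : c = a
      · subst hc
        simp only [beq_self_eq_true, if_pos, List.drop_succ_cons, List.length_nil, List.drop_zero]
        rw [ih f (new.reverse ++ acc) (by omega)]
        simp
      · rw [if_neg (by simp [Ne.symm hc])]
        rw [ih f (c :: acc) (by omega)]
        simp [hc]

theorem replace_single (l : List Char) (a : Char) (new : List Char) :
    PySem.Chars.replace l [a] new = l.flatMap (fun c => if c = a then new else [c]) := by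
  unfold PySem.Chars.replace
  simp [replace_go_single a new l l.length [] le_rfl]

theorem escape_text_toList (s : String) :
    (escape_text s).toList = s.toList.flatMap esc3 := by
  unfold escape_text
  rw [PySem.Str.toList_replace, PySem.Str.toList_replace, PySem.Str.toList_replace]
  rw [show ("&".toList) = ['&'] from by decide, show ("<".toList) = ['<'] from by decide,
      show (">".toList) = ['>'] from by decide]
  rw [replace_single, replace_single, replace_single]
  rw [List.flatMap_assoc, List.flatMap_assoc]
  apply List.flatMap_congr
  intro c _
  by_cases h1 : c = '&'
  · subst h1; decide
  · by_cases h2 : c = '<'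
    · subst h2; decide
    · by_cases h3 : c = '>'
      · subst h3; decide
      · simp [esc3, h1, h2, h3]

theorem splitOn_go_nl :
    ∀ (l : List Char) (fuel : Nat) (cur : List Char) (acc : List (List Char)), l.length ≤ fuel →
      PySem.Chars.splitOn.go ['\n'] fuel l cur acc
        = acc.reverse ++ headPrep cur.reverse (splitNL l) := by
  intro l
  induction l with
  | nil =>
    intro fuel cur acc _
    rw [PySem.Chars.splitOn.go.eq_def]
    cases fuel <;> simp [splitNL, headPrep]
  | cons c t ih =>
    intro fuel cur acc h
    cases fuel with
    | zero => simp at h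
    | succ f =>
      rw [PySem.Chars.splitOn.go.eq_def]
      simp only [List.isPrefixOf, Bool.and_true, List.length_cons] at *
      by_cases hc : c = '\n'
      · subst hc
        simp only [beq_self_eq_true, if_pos, List.drop_succ_cons, List.length_nil, List.drop_zero]
        rw [ih f [] (cur.reverse :: acc) (by omega)]
        rcases hsp : splitNL t with _ | ⟨h', tl⟩
        · exact absurd hsp (splitNL_ne_nil t)
        · simp [splitNL, hsp, headPrep]
      · rw [if_neg (by simp [Ne.symm hc])]
        rw [ih f (c :: cur) acc (by omega)]
        rcases hsp : splitNL t with _ | ⟨h', tl⟩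
        · exact absurd hsp (splitNL_ne_nil t)
        · simp [splitNL, hsp, headPrep, hc]

theorem splitOn_nl (l : List Char) : PySem.Chars.splitOn l ['\n'] = splitNL l := by
  unfold PySem.Chars.splitOn
  rw [splitOn_go_nl l (l.length + 1) [] [] (by omega)]
  rcases hsp : splitNL l with _ | ⟨h', tl⟩
  · exact absurd hsp (splitNL_ne_nil l)
  · simp [headPrep]

theorem intercalate_cons₂ (sep x y : List Char) (tl : List (List Char)) :
    List.intercalate sep (x :: y :: tl) = x ++ sep ++ List.intercalate sep (y :: tl) := by
  simp [List.intercalate, List.intersperse_cons₂, List.append_assoc]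

theorem intercalate_single (sep x : List Char) : List.intercalate sep [x] = x := by
  simp [List.intercalate]

theorem join_nil_eq_flatten (xs : List (List Char)) :
    PySem.Chars.join [] xs = xs.flatten := by
  unfold PySem.Chars.join
  induction xs with
  | nil => simp [List.intercalate]
  | cons x t ih =>
    cases t with
    | nil => simp [List.intercalate]
    | cons y tt =>
      rw [intercalate_cons₂] at *
      simp_all

theorem foldA (n : Nat) :
    ∀ (rest : List String) (k : Int) (acc : List String), k + rest.length = n →
      (PySem.List.enumerate rest k).foldl (fun runs ip =>
          let t := escape_text ip.2
          let runs := runs ++ ["<w:r><w:t xml:space=\"preserve\">" ++ t ++ "</w:t></w:r>"]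
          if ip.1 < (n : Int) - 1 then runs ++ ["<w:r><w:br/></w:r>"] else runs) acc
        = acc ++ spread rest := by
  intro rest
  induction rest with
  | nil => intro k acc _; simp [PySem.List.enumerate, spread]
  | cons p t ih =>
    intro k acc h
    simp only [PySem.List.enumerate, List.foldl_cons]
    cases t with
    | nil =>
      simp only [List.length_cons, List.length_nil] at h
      rw [if_neg (by omega)]
      simp [PySem.List.enumerate, spread, wrapS]
    | cons q tt =>
      simp only [List.length_cons] at h ih ⊢
      rw [if_pos (by push_cast at h ⊢; omega)]
      rw [ih (k + 1) _ (by push_cast at h ⊢; omega)]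
      simp [spread, wrapS]

theorem spread_flatten (ps : List (List Char)) (h : ps ≠ []) :
    ((spread (ps.map String.ofList)).map String.toList).flatten
      = "<w:r><w:t xml:space=\"preserve\">".toList
        ++ List.intercalate midL (ps.map (fun p => p.flatMap esc3))
        ++ "</w:t></w:r>".toList := by
  induction ps with
  | nil => exact absurd rfl h
  | cons x t ih =>
    cases t with
    | nil =>
      simp only [List.map_cons, List.map_nil, spread, List.flatten, intercalate_single]
      rw [wrapS, String.toList_append, String.toList_append, escape_text_toList]
      simp [String.toList_ofList]
    | cons y tt =>
      simp only [List.map_cons, spread, List.flatten_cons]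
      rw [show (String.ofList y :: List.map String.ofList tt) = List.map String.ofList (y :: tt)
            from by simp]
      rw [ih (by simp)]
      rw [wrapS, String.toList_append, String.toList_append, escape_text_toList]
      rw [List.map_cons, intercalate_cons₂]
      rw [show midL = "</w:t></w:r>".toList ++ "<w:r><w:br/></w:r>".toList
            ++ "<w:r><w:t xml:space=\"preserve\">".toList from by decide]
      simp [String.toList_ofList, List.append_assoc]

theorem intercalate_head_append (sep a x : List Char) (xs : List (List Char)) :
    List.intercalate sep ((a ++ x) :: xs) = a ++ List.intercalate sep (x :: xs) := by
  cases xs with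
  | nil => rw [intercalate_single, intercalate_single]
  | cons z zz => rw [intercalate_cons₂, intercalate_cons₂]; simp [List.append_assoc]

theorem pvEscChar_toList (c : Char) (hc : c ≠ '\n') : (pvEscChar c).toList = esc3 c := by
  by_cases h1 : c = '&'
  · subst h1; decide
  · by_cases h2 : c = '<'
    · subst h2; decide
    · by_cases h3 : c = '>'
      · subst h3; decide
      · simp [pvEscChar, esc3, h1, h2, h3, hc, String.toList_ofList]

theorem intercalate_splitNL (l : List Char) :
    List.intercalate midL ((splitNL l).map (fun p => p.flatMap esc3))
      = l.flatMap (fun c => (pvEscChar c).toList) := by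
  induction l with
  | nil => simp [splitNL, intercalate_single]
  | cons c t ih =>
    by_cases hc : c = '\n'
    · subst hc
      rcases hsp : splitNL t with _ | ⟨h', tl⟩
      · exact absurd hsp (splitNL_ne_nil t)
      · rw [hsp] at ih
        simp only [splitNL, hsp, if_true, List.map_cons, List.flatMap_cons]
        rw [intercalate_cons₂]
        simp only [List.flatMap_nil, List.nil_append]
        rw [show (List.flatMap esc3 h' :: List.map (fun p => List.flatMap esc3 p) tl)
              = List.map (fun p => List.flatMap esc3 p) (h' :: tl) from by simp, ih,
            show (pvEscChar '\n').toList = midL from by decide]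
    · simp only [splitNL, if_neg hc, List.flatMap_cons]
      rcases hsp : splitNL t with _ | ⟨h', tl⟩
      · exact absurd hsp (splitNL_ne_nil t)
      · rw [hsp] at ih
        simp only [List.map_cons] at ih ⊢
        rw [List.flatMap_cons, intercalate_head_append, ih, pvEscChar_toList c hc]

theorem make_run_eq (text : String) : make_run text = make_run_alt text := by
  unfold make_run
  have hparts : (PySem.Str.split? text "\n").getD []
      = (splitNL text.toList).map String.ofList := by
    unfold PySem.Str.split? PySem.Chars.split?
    rw [show ("\n".toList) = ['\n'] from by decide]
    simp [splitOn_nl]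
  rw [hparts]
  simp only []
  rw [foldA (((splitNL text.toList).map String.ofList).length) _ 0 [] (by simp)]
  rw [← String.toList_inj]
  unfold PySem.Str.join make_run_alt
  unfold PySem.Str.join
  simp only [String.toList_ofList, String.toList_append, List.nil_append,
    show ("".toList) = ([] : List Char) from by decide, join_nil_eq_flatten]
  rw [spread_flatten _ (splitNL_ne_nil _), intercalate_splitNL]
  rw [List.flatMap, List.map_map]
  rfl

-- ===== VERDICT (by name: the statement is the Claim_ definition above) =====
theorem make_run_spec : Claim_equal_make_run := by
  intro text _
  exact make_run_eq text
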